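-- pv_equiv track=rewrite | github.com/HuXinying0420/DataMining_XJTU_2023 | Apriori/code/Apriori.py | C_sup
-- ===== SOURCE A (Python) =====
-- def C_sup(dataset,itemset_Ck):
--     C_sup = []
--     for c in itemset_Ck:
--         count = 0  #计数
--         for i in range(len(dataset)):
--             if set(c) <= set(dataset[i]):  #选择不重复的元素
--                 count += 1
--         C_sup.append([c,count])
--     return C_sup
-- ===== SOURCE B (Python) =====
-- def C_sup(dataset, itemset_Ck):
--     # Inverted index: item -> list of transaction ids containing it.
--     index = {}
--     for tid, t in enumerate(dataset):
--         for item in dict.fromkeys(t):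
--             index.setdefault(item, []).append(tid)
--     result = []
--     for c in itemset_Ck:
--         items = list(dict.fromkeys(c))
--         if not items:
--             result.append([c, len(dataset)])
--         else:
--             acc = index.get(items[0], [])
--             for item in items[1:]:
--                 post = set(index.get(item, []))
--                 acc = [tid for tid in acc if tid in post]
--             result.append([c, len(acc)])
--     return result
-- ===== Notes on version B (the rewrite author's own statement) =====
-- stated objective: faster
-- what changed: Replaces the per-candidate scan of the whole dataset (building both sets each time) with an inverted index item->posting list built once, intersecting the candidate's posting lists to count support.
import Mathlib
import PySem

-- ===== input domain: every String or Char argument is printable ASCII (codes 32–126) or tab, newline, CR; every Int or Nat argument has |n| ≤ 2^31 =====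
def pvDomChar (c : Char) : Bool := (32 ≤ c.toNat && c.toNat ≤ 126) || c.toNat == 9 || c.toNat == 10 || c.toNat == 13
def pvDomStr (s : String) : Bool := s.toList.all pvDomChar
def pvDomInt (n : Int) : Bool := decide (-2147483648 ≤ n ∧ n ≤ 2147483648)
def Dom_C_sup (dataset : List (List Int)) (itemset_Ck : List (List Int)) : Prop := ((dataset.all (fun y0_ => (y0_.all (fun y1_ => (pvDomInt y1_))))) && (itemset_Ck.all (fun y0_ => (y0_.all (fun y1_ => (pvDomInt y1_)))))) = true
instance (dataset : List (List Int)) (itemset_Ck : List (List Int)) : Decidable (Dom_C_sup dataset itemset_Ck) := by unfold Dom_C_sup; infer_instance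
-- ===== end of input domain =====

-- B builds an inverted index item -> posting list once and intersects posting lists per candidate, instead of A's per-candidate scan of the whole dataset.


-- ===== PORT A =====
def C_sup (dataset : List (List Int)) (itemset_Ck : List (List Int)) : List (List Int × Int) :=
  itemset_Ck.foldl (fun acc c =>
    acc ++ [(c,
      -- for i in range(len(dataset)): if set(c) <= set(dataset[i]): count += 1
      (PySem.List.pyRange 0 (dataset.length : Int) 1).foldl
        (fun count i =>
          -- dataset[i]: i is always in range here, so pyGetD is exact
          if PySem.Set.issubset (PySem.Set.ofList c) (PySem.Set.ofList (PySem.List.pyGetD dataset i [])) then count + 1 else count)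
        0)]) []

-- ===== PORT B =====
-- index.setdefault(item, []).append(tid), over the distinct items of each transaction
def pvBuildIndex (dataset : List (List Int)) : PySem.Dict Int (List Int) :=
  (PySem.List.enumerate dataset).foldl (fun idx p =>
    (PySem.List.dedup p.2).foldl (fun idx item => idx.modify item [] (fun v => v ++ [p.1])) idx)
    PySem.Dict.empty

def C_sup_alt (dataset : List (List Int)) (itemset_Ck : List (List Int)) : List (List Int × Int) :=
  let idx := pvBuildIndex dataset
  itemset_Ck.foldl (fun res c =>
    res ++ [(c,
      match PySem.List.dedup c with
      | [] => (dataset.length : Int)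
      | i0 :: rest =>
        ((rest.foldl (fun acc item => acc.filter (fun tid => decide (tid ∈ idx.getD item [])))
            (idx.getD i0 [])).length : Int))]) []

-- ===== PRECONDITION & SPEC =====
def Spec_C_sup (dataset : List (List Int)) (itemset_Ck : List (List Int)) (out : List (List Int × Int)) : Prop := out = C_sup_alt dataset itemset_Ck
instance (dataset : List (List Int)) (itemset_Ck : List (List Int)) (out : List (List Int × Int)) : Decidable (Spec_C_sup dataset itemset_Ck out) := by unfold Spec_C_sup; infer_instance

-- ===== CLAIM (what is proved, stated in full; the proofs are below) =====
def Claim_equal_C_sup : Prop := ∀ (dataset : List (List Int)) (itemset_Ck : List (List Int)), Dom_C_sup dataset itemset_Ck → Spec_C_sup dataset itemset_Ck (C_sup dataset itemset_Ck)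

-- ===== LEMMAS AND PROOFS =====

-- one transaction: appending tid to the posting list of each distinct item
lemma pvIndex_inner (l : List Int) (hl : l.Nodup) (idx : PySem.Dict Int (List Int)) (tid : Int) (x : Int) :
    (l.foldl (fun idx item => idx.modify item [] (fun v => v ++ [tid])) idx).getD x []
      = if x ∈ l then idx.getD x [] ++ [tid] else idx.getD x [] := by
  induction l generalizing idx with
  | nil => simp
  | cons a l ih =>
    obtain ⟨hal, hln⟩ := List.nodup_cons.mp hl
    simp only [List.foldl_cons]
    rw [ih hln, PySem.Dict.getD_modify]
    by_cases hxa : x = a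
    · subst hxa; simp [hal]
    · simp [hxa, List.mem_cons]

-- the whole index: posting list of x = ids of the enumerated transactions containing x
lemma pvIndex_chara (ds : List (List Int)) (s : Int) (idx : PySem.Dict Int (List Int)) (x : Int) :
    ((PySem.List.enumerate ds s).foldl
        (fun idx p => (PySem.List.dedup p.2).foldl (fun idx item => idx.modify item [] (fun v => v ++ [p.1])) idx)
        idx).getD x []
      = idx.getD x [] ++ ((PySem.List.enumerate ds s).filter (fun p => decide (x ∈ p.2))).map (·.1) := by
  induction ds generalizing s idx with
  | nil => simp [PySem.List.enumerate]
  | cons t ds ih =>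
    rw [PySem.List.enumerate_cons]
    simp only [List.foldl_cons, List.filter_cons]
    rw [ih, pvIndex_inner _ (PySem.List.nodup_dedup t)]
    by_cases hx : x ∈ t
    · simp [hx]
    · simp [hx]

lemma pvPostings (ds : List (List Int)) (x : Int) :
    (pvBuildIndex ds).getD x []
      = ((PySem.List.enumerate ds).filter (fun p => decide (x ∈ p.2))).map (·.1) := by
  unfold pvBuildIndex
  rw [pvIndex_chara]
  simp

-- ids of enumerated pairs are unique, so fst-membership in a filtered projection reads off the predicate
lemma pvFstMem (ds : List (List Int)) (p : Int × List Int) (hp : p ∈ PySem.List.enumerate ds 0)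
    (q : Int × List Int → Bool) :
    (p.1 ∈ ((PySem.List.enumerate ds).filter q).map (·.1)) ↔ q p = true := by
  constructor
  · intro h
    obtain ⟨p', hp', hfst⟩ := List.mem_map.mp h
    have hq := (List.mem_filter.mp hp').2
    have hm := (List.mem_filter.mp hp').1
    obtain ⟨k, hk, rfl⟩ := (PySem.List.mem_enumerate_iff _ _ _).mp hp
    obtain ⟨k', hk', hp'eq⟩ := (PySem.List.mem_enumerate_iff _ _ _).mp hm
    subst hp'eq
    simp only at hfst
    have hkk : k' = k := by omega
    subst hkk
    exact hq
  · intro h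
    exact List.mem_map.mpr ⟨p, List.mem_filter.mpr ⟨hp, h⟩, rfl⟩

-- intersecting posting lists = one filter over the enumerated dataset
lemma pvFoldFilter (ds : List (List Int)) (rest : List Int) (P : Int × List Int → Bool) :
    rest.foldl (fun acc item => acc.filter (fun tid => decide (tid ∈ (pvBuildIndex ds).getD item [])))
        (((PySem.List.enumerate ds).filter P).map (·.1))
      = ((PySem.List.enumerate ds).filter (fun p => P p && rest.all (fun it => decide (it ∈ p.2)))).map (·.1) := by
  induction rest generalizing P with
  | nil => simp
  | cons it rest ih =>
    simp only [List.foldl_cons]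
    rw [List.filter_map, List.filter_filter]
    have hcong : ((PySem.List.enumerate ds).filter
          (fun p => ((fun tid => decide (tid ∈ (pvBuildIndex ds).getD it [])) ∘ (·.1)) p && P p))
        = (PySem.List.enumerate ds).filter (fun p => P p && decide (it ∈ p.2)) := by
      apply List.filter_congr
      intro p hp
      have : decide (p.1 ∈ (pvBuildIndex ds).getD it []) = decide (it ∈ p.2) := by
        rw [pvPostings]
        exact decide_eq_decide.mpr
          ((pvFstMem ds p hp (fun p => decide (it ∈ p.2))).trans (by simp))
      simp only [Function.comp, this, Bool.and_comm]
    rw [hcong, ih]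
    apply congrArg
    apply List.filter_congr
    intro p _
    simp [Bool.and_assoc]

-- per-candidate: A's subset-count over range(len(dataset)) = length of B's intersected posting list
lemma pvCount_eq (ds : List (List Int)) (c : List Int) :
    (PySem.List.pyRange 0 (ds.length : Int) 1).foldl
        (fun count i =>
          if PySem.Set.issubset (PySem.Set.ofList c) (PySem.Set.ofList (PySem.List.pyGetD ds i [])) then count + 1 else count)
        (0 : Int)
      = (match PySem.List.dedup c with
         | [] => (ds.length : Int)
         | i0 :: rest =>
           ((rest.foldl (fun acc item => acc.filter (fun tid => decide (tid ∈ (pvBuildIndex ds).getD item [])))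
              ((pvBuildIndex ds).getD i0 [])).length : Int)) := by
  rw [PySem.List.foldl_count_if]
  have hsub : ∀ t : List Int,
      PySem.Set.issubset (PySem.Set.ofList c) (PySem.Set.ofList t)
        = (PySem.List.dedup c).all (fun it => decide (it ∈ t)) := by
    intro t
    rw [Bool.eq_iff_iff]
    simp [PySem.Set.issubset_iff, List.all_eq_true, PySem.Set.mem_ofList]
  have hlen : (PySem.List.pyRange 0 (ds.length : Int) 1).length = ds.length := by
    have h := congrArg List.length (PySem.List.map_fst_enumerate ds 0)
    simp only [List.length_map, PySem.List.length_enumerate, zero_add] at h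
    exact h.symm
  cases hdc : PySem.List.dedup c with
  | nil =>
    simp only [hsub, hdc, List.all_nil, zero_add]
    simp [List.countP_true, hlen]
  | cons i0 rest =>
    show _ = ((rest.foldl (fun acc item => acc.filter (fun tid => decide (tid ∈ (pvBuildIndex ds).getD item [])))
        ((pvBuildIndex ds).getD i0 [])).length : Int)
    rw [pvPostings, pvFoldFilter]
    simp only [zero_add]
    have henum : PySem.List.enumerate ds
        = (PySem.List.pyRange 0 (ds.length : Int) 1).map (fun j => (j, PySem.List.pyGetD ds j ([] : List Int))) := by
      simpa [PySem.List.len] using PySem.List.enumerate_eq_map_pyRange ds ([] : List Int)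
    rw [henum, List.filter_map]
    simp only [List.length_map, ← List.countP_eq_length_filter, Nat.cast_inj]
    apply List.countP_congr
    intro i _
    simp only [hsub, hdc, Function.comp, List.all_cons]

-- ===== VERDICT (by name: the statement is the Claim_ definition above) =====
theorem C_sup_spec : Claim_equal_C_sup := by
  intro dataset itemset_Ck _
  unfold Spec_C_sup C_sup C_sup_alt
  rw [PySem.List.foldl_append_singleton_eq_map, PySem.List.foldl_append_singleton_eq_map]
  simp only [List.nil_append]
  apply List.map_congr_left
  intro c _
  exact congrArg (fun v => (c, v)) (pvCount_eq dataset c)
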